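/- GENERATED by tools/from_farm_form.py from prooffarm-gif/accepted/DGifGetImageDesc.3/Proof.lean (a worked proof of the farm's unit `DGifGetImageDesc.3`,
   accepted by the verdict) — do not edit. -/
import Gif.Spec.Units.DGifGetImageDesc_3
import Gif.Spec.AllSegs
import Gif.Spec.Proved.DGifGetImageDesc_3_Lemmas

open X86 X86.User Asan ProgX.Base ProgX.Base.Spec Gif.Spec

/-!
  `DGifGetImageDesc.3` (0x1095e6 … 0x10961e, 12 instructions; dgif_lib.c:454-457): THE FIRST SavedImages ARRAY. `malloc(56)`, the
  checked store of the result to `gif.SavedImages`, and on NULL the checked store of `gif.Error`. The return address of `malloc`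
  (0x1095f0, `ret21`) is not a cut of the design: the unit makes it one of its own, with two private assertions (Lemmas.lean) —
  `s3_AtOk` (an object was returned: the heap is `Hc.push 56 (r16 56)`, the forest is untouched) and `s3_AtFail` (NULL: the same
  heap) —, and three walks chained here:

      s3_seg_call   0x1095e6 … the call of malloc … 0x1095f0          `NoArray` → `s3_AtOk ∨ s3_AtFail`
      s3_seg_ok     0x1095f0 … 0x109503 (`jne` taken)                  `s3_AtOk` → `Grown` (the forest gets the array of one slot)
      s3_seg_fail   0x1095f0 … 0x109619 → 0x10949a (`jne` not taken)   `s3_AtFail` → `Done` (GIF_ERROR, the same heap and forest)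
-/

/-- Segment 3 of `DGifGetImageDesc` takes `NoArray` at 0x1095e6 to `Grown` at 0x109503 or to `Done` at 0x10949a. -/
theorem Gif.Spec.Proved.DGifGetImageDesc_3_ok : Gif.Spec.DGifGetImageDesc_3.Statement := by
  intro Lay hLay μ hμ u₀ hcode h_malloc h_asan_store8_noabort h_asan_store4_noabort H rest frames F R e ret Hc Fc v hat
  -- malloc's contract for the PRESENT heap and the entry's frames (the function has no protected frame)
  have hm := h_malloc Hc rest frames
  -- 0x1095e6 … the call … 0x1095f0 (ret21)
  refine (Gif.Spec.DGifGetImageDesc_3.s3_seg_call Lay hLay μ hμ u₀ hcode H rest frames F R e ret Hc Fc hm v hat).trans ?_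
  intro v1 hv1
  rcases hv1 with hok | hfail
  · -- 0x1095f0 … 0x109503: the new array is stored
    exact Gif.Spec.DGifGetImageDesc_3.s3_seg_ok Lay hLay μ hμ u₀ hcode H rest frames F R e ret Hc Fc
      h_asan_store8_noabort v1 hok
  · -- 0x1095f0 … 0x10949a: NULL, `gif.Error` is stored
    exact Gif.Spec.DGifGetImageDesc_3.s3_seg_fail Lay hLay μ hμ u₀ hcode H rest frames F R e ret Hc Fc
      h_asan_store8_noabort h_asan_store4_noabort v1 hfail
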